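-- pv_equiv track=rewrite | github.com/JeewaniGunarathna/IRWA-project-Public-Health-Info-AI | backend/orchestrator/main.py | _canonical_disease_from_prefix
-- ===== SOURCE A (Python) =====
-- DISEASES = {
--     "covid 19": ["covid 19", "covid19", "covid-19", "covid", "corona"],
--     "dengue":   ["dengue", "den", "dengu"],
--     "influenza": ["influenza", "flu", "flu "],  # note: "flu " to avoid matching words like "fluent"
--     "malaria":  ["malaria", "malar"],
--     "tuberculosis": ["tuberculosis", "tb", "tuber"],
-- }
--
-- def _canonical_disease_from_prefix(q: str) -> str | None:
--     s = (q or "").lower().strip()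
--     # strongest signal: user starts typing the disease name
--     for canonical, aliases in DISEASES.items():
--         for a in aliases:
--             if s.startswith(a):
--                 return canonical
--     # weaker: disease occurs anywhere early in the string
--     for canonical, aliases in DISEASES.items():
--         for a in aliases:
--             if a in s:
--                 return canonical
--     return None
-- ===== SOURCE B (Python) =====
-- DISEASES = {
--     "covid 19": ["covid 19", "covid19", "covid-19", "covid", "corona"],
--     "dengue":   ["dengue", "den", "dengu"],
--     "influenza": ["influenza", "flu", "flu "],
--     "malaria":  ["malaria", "malar"],
--     "tuberculosis": ["tuberculosis", "tb", "tuber"],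
-- }
--
-- def _canonical_disease_from_prefix(q: str) -> str | None:
--     s = (q or "").lower().strip()
--     pending = None  # first substring-only match seen so far
--     for canonical, aliases in DISEASES.items():
--         for a in aliases:
--             if s.startswith(a):
--                 return canonical  # a prefix match dominates any substring match
--             if pending is None and a in s:
--                 pending = canonical
--     return pending
-- ===== Notes on version B (the rewrite author's own statement) =====
-- stated objective: simpler
-- what changed: Collapsed A's two sequential full scans of DISEASES (prefix pass, then substring pass) into one scan that returns on the first prefix match and otherwise carries the first substring match as a pending candidate returned after the loop.
import Mathlib
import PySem

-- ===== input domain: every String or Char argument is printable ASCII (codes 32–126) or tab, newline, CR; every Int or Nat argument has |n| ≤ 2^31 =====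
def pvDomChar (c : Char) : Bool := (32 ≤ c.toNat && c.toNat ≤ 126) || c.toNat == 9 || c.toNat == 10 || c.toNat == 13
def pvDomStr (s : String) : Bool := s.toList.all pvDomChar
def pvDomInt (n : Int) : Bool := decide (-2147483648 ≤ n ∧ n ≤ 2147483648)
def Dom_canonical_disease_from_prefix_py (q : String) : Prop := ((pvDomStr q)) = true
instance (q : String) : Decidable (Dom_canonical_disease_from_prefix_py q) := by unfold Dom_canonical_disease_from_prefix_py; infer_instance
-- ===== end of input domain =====

-- B collapses A's two sequential scans (prefix pass, then substring pass) into one scan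
-- that returns on the first prefix match and otherwise carries the first substring match
-- as a pending candidate; objective: simpler (one pass instead of two).

-- the DISEASES table, in Python's insertion order
def pvDiseases : List (String × List String) :=
  [ ("covid 19", ["covid 19", "covid19", "covid-19", "covid", "corona"])
  , ("dengue", ["dengue", "den", "dengu"])
  , ("influenza", ["influenza", "flu", "flu "])
  , ("malaria", ["malaria", "malar"])
  , ("tuberculosis", ["tuberculosis", "tb", "tuber"]) ]

-- ===== PORT A =====
-- inner loop of pass 1: 'for a in aliases: if s.startswith(a): return canonical'
def pvInnerPrefix (c : String) (s : String) : List String → Option String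
  | [] => none
  | a :: t => if PySem.Str.startswith s a then some c else pvInnerPrefix c s t

-- pass 1 over the table
def pvPassPrefix (s : String) : List (String × List String) → Option String
  | [] => none
  | (c, as) :: rest =>
    match pvInnerPrefix c s as with
    | some r => some r
    | none => pvPassPrefix s rest

-- inner loop of pass 2: 'for a in aliases: if a in s: return canonical'
def pvInnerContains (c : String) (s : String) : List String → Option String
  | [] => none
  | a :: t => if PySem.Str.isIn a s then some c else pvInnerContains c s t

-- pass 2 over the table
def pvPassContains (s : String) : List (String × List String) → Option String
  | [] => none
  | (c, as) :: rest =>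
    match pvInnerContains c s as with
    | some r => some r
    | none => pvPassContains s rest

def canonical_disease_from_prefix_py (q : String) : Option String :=
  let s := PySem.Str.strip (PySem.Str.lower q)   -- s = (q or "").lower().strip()
  match pvPassPrefix s pvDiseases with
  | some r => some r
  | none => pvPassContains s pvDiseases

-- ===== PORT B =====
-- B's inner loop: early return (.inl) on a prefix match, otherwise thread 'pending'
def pvAltInner (c : String) (s : String) (pending : Option String) :
    List String → String ⊕ Option String
  | [] => .inr pending
  | a :: t =>
    if PySem.Str.startswith s a then .inl c
    else pvAltInner c s (if pending.isNone && PySem.Str.isIn a s then some c else pending) t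

-- B's single scan over the table
def pvAltLoop (s : String) (pending : Option String) : List (String × List String) → Option String
  | [] => pending
  | (c, as) :: rest =>
    match pvAltInner c s pending as with
    | .inl r => some r
    | .inr p => pvAltLoop s p rest

def canonical_disease_from_prefix_py_alt (q : String) : Option String :=
  let s := PySem.Str.strip (PySem.Str.lower q)
  pvAltLoop s none pvDiseases

-- ===== PRECONDITION & SPEC =====
def Spec_canonical_disease_from_prefix_py (q : String) (out : Option String) : Prop := out = canonical_disease_from_prefix_py_alt q
instance (q : String) (out : Option String) : Decidable (Spec_canonical_disease_from_prefix_py q out) := by unfold Spec_canonical_disease_from_prefix_py; infer_instance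

-- ===== CLAIM (what is proved, stated in full; the proofs are below) =====
def Claim_equal_canonical_disease_from_prefix_py : Prop := ∀ (q : String), Dom_canonical_disease_from_prefix_py q → Spec_canonical_disease_from_prefix_py q (canonical_disease_from_prefix_py q)

-- ===== LEMMAS AND PROOFS =====

-- B's inner loop equals: first prefix match wins (.inl), else pending or-else first substring match
theorem pvAltInner_eq (c s : String) (as : List String) (p : Option String) :
    pvAltInner c s p as =
      match pvInnerPrefix c s as with
      | some r => .inl r
      | none => .inr (p.or (pvInnerContains c s as)) := by
  induction as generalizing p with
  | nil => cases p <;> simp [pvAltInner, pvInnerPrefix, pvInnerContains, Option.or]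
  | cons a t ih =>
    by_cases hpre : PySem.Chars.startswith s.toList a.toList = true
    · simp [pvAltInner, pvInnerPrefix, hpre]
    · simp only [pvAltInner, pvInnerPrefix, pvInnerContains,
        PySem.Str.startswith_eq, hpre, if_false, Bool.false_eq_true]
      rw [ih]
      cases p with
      | some v => cases h : pvInnerPrefix c s t <;> simp [h, Option.or]
      | none =>
        by_cases hin : PySem.Chars.isIn a.toList s.toList = true <;>
          cases h : pvInnerPrefix c s t <;> simp [hin, h, Option.or]

-- B's scan equals: pass-1 result if any, else pending or-else pass-2 result
theorem pvAltLoop_eq (s : String) (L : List (String × List String)) (p : Option String) :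
    pvAltLoop s p L =
      match pvPassPrefix s L with
      | some r => some r
      | none => p.or (pvPassContains s L) := by
  induction L generalizing p with
  | nil => cases p <;> simp [pvAltLoop, pvPassPrefix, pvPassContains, Option.or]
  | cons hd rest ih =>
    obtain ⟨c, as⟩ := hd
    simp only [pvAltLoop, pvPassPrefix, pvPassContains, pvAltInner_eq]
    cases hpre : pvInnerPrefix c s as with
    | some r => simp
    | none =>
      simp only []
      rw [ih]
      cases h : pvPassPrefix s rest with
      | some r => simp
      | none =>
        cases hc : pvInnerContains c s as <;> cases p <;> simp [Option.or]

-- ===== VERDICT (by name: the statement is the Claim_ definition above) =====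
theorem canonical_disease_from_prefix_py_spec : Claim_equal_canonical_disease_from_prefix_py := by
  intro q _
  unfold Spec_canonical_disease_from_prefix_py canonical_disease_from_prefix_py canonical_disease_from_prefix_py_alt
  rw [pvAltLoop_eq]
  cases h : pvPassPrefix (PySem.Str.strip (PySem.Str.lower q)) pvDiseases <;> simp [h, Option.or]
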